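-- pv_equiv track=rewrite | github.com/FrMohamedFaris/LeetCode_submission | 38.py | maxProfitAssignment
-- ===== SOURCE A (Python) =====
-- def maxProfitAssignment(difficulty, profit, worker):
--     max_profit = 0
--     total_profit = 0
--     worker.sort()
--     jobs = sorted(zip(difficulty, profit))
--     n = len(jobs)
--     i = 0
--
--     for ability in worker:
--         while i < n and jobs[i][0] <= ability:
--             max_profit = max(max_profit, jobs[i][1])
--             i += 1
--         total_profit += max_profit
--
--     return total_profit
--
-- difficulty = [13, 37, 58]
--
-- profit = [4, 90, 96]
--
-- worker = [34, 73, 45]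
-- ===== SOURCE B (Python) =====
-- def maxProfitAssignment(difficulty, profit, worker):
--     # Note: like the original, this sorts `worker` in place (observable side effect).
--     worker.sort()
--     jobs = sorted(zip(difficulty, profit))
--     diffs = [d for d, _ in jobs]
--     # best[k] = best profit (floored at 0) among the k easiest jobs
--     best = [0]
--     cur = 0
--     for _, p in jobs:
--         cur = max(cur, p)
--         best.append(cur)
--
--     def count_le(a):
--         # number of jobs with difficulty <= a, by binary search on sorted diffs
--         lo, hi = 0, len(diffs)
--         while lo < hi:
--             mid = (lo + hi) // 2
--             if diffs[mid] <= a: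
--                 lo = mid + 1
--             else:
--                 hi = mid
--         return lo
--
--     return sum(best[count_le(a)] for a in worker)
-- ===== Notes on version B (the rewrite author's own statement) =====
-- stated objective: alternative
-- what changed: Replaces the coordinated two-pointer sweep (sorted workers sharing one moving job index and a running max) with a precomputed prefix-maximum table over the sorted jobs plus an independent binary-search lookup per worker.
import Mathlib
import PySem

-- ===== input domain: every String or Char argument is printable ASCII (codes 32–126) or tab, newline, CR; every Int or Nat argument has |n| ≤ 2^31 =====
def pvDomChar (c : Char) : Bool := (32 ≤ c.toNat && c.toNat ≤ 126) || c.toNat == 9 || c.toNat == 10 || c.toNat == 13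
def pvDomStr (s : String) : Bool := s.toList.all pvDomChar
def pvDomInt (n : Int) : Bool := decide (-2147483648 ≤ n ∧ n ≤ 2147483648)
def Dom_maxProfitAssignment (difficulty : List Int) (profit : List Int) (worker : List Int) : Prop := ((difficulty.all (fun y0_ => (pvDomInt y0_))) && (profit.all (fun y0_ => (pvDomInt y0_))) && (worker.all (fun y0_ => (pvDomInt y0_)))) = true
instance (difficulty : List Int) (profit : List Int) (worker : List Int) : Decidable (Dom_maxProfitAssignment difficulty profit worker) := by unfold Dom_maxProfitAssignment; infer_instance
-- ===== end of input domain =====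

-- B replaces A's coordinated two-pointer sweep by a prefix-maximum table plus an
-- independent binary-search lookup per worker (alternative algorithm, similar cost).
-- Both A and B sort `worker` in place; the equivalence proved here is about the return value.


-- ===== PORT A =====
-- the inner 'while i < n and jobs[i][0] <= ability' loop; jobs[i] is in range whenever
-- read (i < n = len jobs), so the getD default is never used
def pvWhileA (jobs : List (Int × Int)) (n : Nat) (a : Int) (i : Nat) (mp : Int) : Nat × Int :=
  if i < n ∧ (jobs.getD i (0, 0)).1 ≤ a then
    pvWhileA jobs n a (i + 1) (max mp (jobs.getD i (0, 0)).2)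
  else (i, mp)
termination_by n - i
decreasing_by omega

def maxProfitAssignment (difficulty : List Int) (profit : List Int) (worker : List Int) : Int :=
  let w := PySem.List.sorted worker (fun x => x)
  let jobs := PySem.List.sorted2 (List.zip difficulty profit) Prod.fst Prod.snd
  let n := jobs.length
  (w.foldl (fun (st : Nat × Int × Int) a =>
      let r := pvWhileA jobs n a st.1 st.2.1
      (r.1, r.2, st.2.2 + r.2)) (0, (0 : Int), (0 : Int))).2.2

-- ===== PORT B =====
-- hand-written binary search from Source B: number of entries ≤ a in the sorted list ds;
-- ds[mid] is in range whenever read (lo ≤ mid < hi ≤ len ds), so the getD default is never used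
def pvCountLe (ds : List Int) (a : Int) (lo hi : Nat) : Nat :=
  if lo < hi then
    let mid := (lo + hi) / 2
    if ds.getD mid 0 ≤ a then pvCountLe ds a (mid + 1) hi else pvCountLe ds a lo mid
  else lo
termination_by hi - lo
decreasing_by all_goals omega

def maxProfitAssignment_alt (difficulty : List Int) (profit : List Int) (worker : List Int) : Int :=
  let jobs := PySem.List.sorted2 (List.zip difficulty profit) Prod.fst Prod.snd
  let diffs := jobs.map Prod.fst
  let best := (jobs.foldl (fun (st : List Int × Int) j =>
      (st.1 ++ [max st.2 j.2], max st.2 j.2)) ([(0 : Int)], (0 : Int))).1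
  (PySem.List.sorted worker (fun x => x)).foldl
    (fun tot a => tot + best.getD (pvCountLe diffs a 0 diffs.length) 0) 0

-- ===== PRECONDITION & SPEC =====
def Spec_maxProfitAssignment (difficulty : List Int) (profit : List Int) (worker : List Int) (out : Int) : Prop := out = maxProfitAssignment_alt difficulty profit worker
instance (difficulty : List Int) (profit : List Int) (worker : List Int) (out : Int) : Decidable (Spec_maxProfitAssignment difficulty profit worker out) := by unfold Spec_maxProfitAssignment; infer_instance

-- ===== CLAIM (what is proved, stated in full; the proofs are below) =====
def Claim_equal_maxProfitAssignment : Prop := ∀ (difficulty : List Int) (profit : List Int) (worker : List Int), Dom_maxProfitAssignment difficulty profit worker → Spec_maxProfitAssignment difficulty profit worker (maxProfitAssignment difficulty profit worker)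

-- ===== LEMMAS AND PROOFS =====

-- the common per-ability value: best profit (floored at 0) among jobs with difficulty ≤ a,
-- read off the sorted jobs list as a fold over its (·.1 ≤ a)-takeWhile prefix
def pvF (jobs : List (Int × Int)) (a : Int) : Int :=
  (jobs.takeWhile (fun j => decide (j.1 ≤ a))).foldl (fun m j => max m j.2) 0

-- Python's lexicographic `<` on int pairs, as sorted2 uses it
def pvBefore (x y : Int × Int) : Bool :=
  decide (x.1 < y.1) || (!decide (y.1 < x.1) && decide (x.2 < y.2))

lemma pvBefore_trans {x y z : Int × Int} (h1 : pvBefore x y = true) (h2 : pvBefore y z = true) :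
    pvBefore x z = true := by
  simp only [pvBefore, Bool.or_eq_true, Bool.and_eq_true, Bool.not_eq_true',
    decide_eq_true_eq, decide_eq_false_iff_not] at *
  omega

lemma pvBefore_asymm {x y : Int × Int} (h : pvBefore x y = true) : pvBefore y x = false := by
  simp only [pvBefore, Bool.or_eq_true, Bool.and_eq_true, Bool.not_eq_true',
    decide_eq_true_eq, decide_eq_false_iff_not] at h
  simp only [pvBefore, Bool.or_eq_false_iff, Bool.and_eq_false_iff, Bool.not_eq_false',
    decide_eq_true_eq, decide_eq_false_iff_not]
  omega

lemma pairwise_insertBy (x : Int × Int) (l : List (Int × Int))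
    (h : l.Pairwise (fun j k => pvBefore k j = false)) :
    (PySem.List.insertBy pvBefore x l).Pairwise (fun j k => pvBefore k j = false) := by
  induction l with
  | nil => simp [PySem.List.insertBy]
  | cons y ys ih =>
    rw [List.pairwise_cons] at h
    obtain ⟨hy, hys⟩ := h
    by_cases hb : pvBefore x y = true
    · rw [PySem.List.insertBy, if_pos hb]
      refine List.Pairwise.cons ?_ (List.Pairwise.cons hy hys)
      intro z hz
      rcases List.mem_cons.mp hz with rfl | hz
      · exact pvBefore_asymm hb
      · have hzy := hy z hz
        rw [Bool.eq_false_iff]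
        intro hzx
        have := pvBefore_trans hzx hb
        rw [hzy] at this; exact Bool.false_ne_true this
    · rw [PySem.List.insertBy, if_neg hb]
      refine List.Pairwise.cons ?_ (ih hys)
      intro z hz
      rw [PySem.List.mem_insertBy] at hz
      rcases hz with rfl | hz
      · exact Bool.eq_false_iff.mpr hb
      · exact hy z hz

lemma pairwise_sorted2 (xs : List (Int × Int)) :
    (PySem.List.sorted2 xs Prod.fst Prod.snd).Pairwise (fun j k => pvBefore k j = false) := by
  have key : ∀ (acc : List (Int × Int)), acc.Pairwise (fun j k => pvBefore k j = false) →
      (xs.foldl (fun acc x => PySem.List.insertBy pvBefore x acc) acc).Pairwise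
        (fun j k => pvBefore k j = false) := by
    induction xs with
    | nil => intro acc h; simpa using h
    | cons x xs ih => intro acc h; exact ih _ (pairwise_insertBy x acc h)
  have : PySem.List.sorted2 xs Prod.fst Prod.snd
      = xs.foldl (fun acc x => PySem.List.insertBy pvBefore x acc) [] := rfl
  rw [this]
  exact key [] (by simp)

lemma fst_mono_sorted2 (xs : List (Int × Int)) :
    (PySem.List.sorted2 xs Prod.fst Prod.snd).Pairwise (fun j k => j.1 ≤ k.1) := by
  refine (pairwise_sorted2 xs).imp ?_
  intro a b hab
  simp only [pvBefore, Bool.or_eq_false_iff, Bool.and_eq_false_iff, Bool.not_eq_false',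
    decide_eq_true_eq, decide_eq_false_iff_not] at hab
  omega

lemma pvWhileA_spec (jobs : List (Int × Int)) (a : Int) :
    ∀ (i : Nat) (mp : Int), i ≤ jobs.length →
    pvWhileA jobs jobs.length a i mp =
      (i + ((jobs.drop i).takeWhile (fun j => decide (j.1 ≤ a))).length,
       ((jobs.drop i).takeWhile (fun j => decide (j.1 ≤ a))).foldl (fun m j => max m j.2) mp) := by
  have key : ∀ (k i : Nat) (mp : Int), jobs.length - i ≤ k → i ≤ jobs.length →
      pvWhileA jobs jobs.length a i mp =
        (i + ((jobs.drop i).takeWhile (fun j => decide (j.1 ≤ a))).length,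
         ((jobs.drop i).takeWhile (fun j => decide (j.1 ≤ a))).foldl (fun m j => max m j.2) mp) := by
    intro k
    induction k with
    | zero =>
      intro i mp hk hi
      have : i = jobs.length := by omega
      subst this
      rw [pvWhileA, if_neg (by omega)]
      simp
    | succ k ih =>
      intro i mp hk hi
      by_cases hlt : i < jobs.length
      · have hdrop : jobs.drop i = jobs[i] :: jobs.drop (i + 1) := List.drop_eq_getElem_cons hlt
        have hget : jobs.getD i (0, 0) = jobs[i] := List.getD_eq_getElem _ _ hlt
        by_cases hle : (jobs[i] : Int × Int).1 ≤ a
        · rw [pvWhileA, if_pos ⟨hlt, by rw [hget]; exact hle⟩, hget,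
            ih (i + 1) _ (by omega) (by omega), hdrop]
          rw [List.takeWhile_cons_of_pos (by simpa using hle)]
          simp [List.foldl_cons]
          omega
        · rw [pvWhileA, if_neg (by rw [hget]; tauto), hdrop,
            List.takeWhile_cons_of_neg (by simpa using hle)]
          simp
      · have : i = jobs.length := by omega
        subst this
        rw [pvWhileA, if_neg (by omega)]
        simp
  intro i mp hi
  exact key (jobs.length - i) i mp le_rfl hi

lemma takeWhile_append_of_all {α : Type} (p : α → Bool) (l₁ l₂ : List α)
    (h : ∀ x ∈ l₁, p x = true) :
    (l₁ ++ l₂).takeWhile p = l₁ ++ l₂.takeWhile p := by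
  induction l₁ with
  | nil => simp
  | cons x xs ih =>
    simp only [List.cons_append, List.takeWhile_cons_of_pos (h x (by simp))]
    rw [ih (fun y hy => h y (by simp [hy]))]

lemma pvA_fold (jobs : List (Int × Int)) :
    ∀ (w : List Int) (i : Nat) (tot : Int), i ≤ jobs.length →
    w.Pairwise (· ≤ ·) →
    (∀ a ∈ w, ∀ j ∈ jobs.take i, j.1 ≤ a) →
    (w.foldl (fun (st : Nat × Int × Int) a =>
        let r := pvWhileA jobs jobs.length a st.1 st.2.1
        (r.1, r.2, st.2.2 + r.2))
      (i, (jobs.take i).foldl (fun m j => max m j.2) 0, tot)).2.2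
    = tot + (w.map (pvF jobs)).sum := by
  intro w
  induction w with
  | nil => intro i tot hi _ _; simp
  | cons a w ih =>
    intro i tot hi hw hpre
    rw [List.pairwise_cons] at hw
    obtain ⟨ha, hw⟩ := hw
    set P : Int × Int → Bool := fun j => decide (j.1 ≤ a) with hP
    have htw := List.takeWhile_prefix (l := jobs.drop i) (p := P)
    set tW := (jobs.drop i).takeWhile P with htWdef
    have htake : jobs.take (i + tW.length) = jobs.take i ++ tW := by
      rw [List.take_add]
      congr 1
      exact (List.prefix_iff_eq_take.mp htw).symm
    have hlen : i + tW.length ≤ jobs.length := by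
      have h1 : tW.length ≤ (jobs.drop i).length := List.IsPrefix.length_le htw
      simp only [List.length_drop] at h1
      omega
    have hfull : jobs.takeWhile P = jobs.take i ++ tW := by
      conv_lhs => rw [← List.take_append_drop i jobs]
      rw [takeWhile_append_of_all P _ _ (fun j hj => by
        simp only [hP, decide_eq_true_eq]
        exact hpre a (by simp) j hj)]
    simp only [List.foldl_cons]
    rw [pvWhileA_spec jobs a i _ hi]
    simp only
    have hmp : tW.foldl (fun m j => max m j.2) ((jobs.take i).foldl (fun m j => max m j.2) 0)
        = (jobs.take (i + tW.length)).foldl (fun m j => max m j.2) 0 := by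
      rw [htake, List.foldl_append]
    rw [hmp, ih (i + tW.length) _ hlen hw ?_]
    · have hF : pvF jobs a = (jobs.take (i + tW.length)).foldl (fun m j => max m j.2) 0 := by
        rw [pvF, htake, hfull]
      rw [List.map_cons, List.sum_cons, hF]
      ring
    · intro a' ha' j hj
      rw [htake] at hj
      rcases List.mem_append.mp hj with hj | hj
      · exact hpre a' (by simp [ha']) j hj
      · have hPj : P j = true := List.mem_takeWhile_imp hj
        have : j.1 ≤ a := by simpa [hP] using hPj
        exact le_trans this (ha a' ha')

lemma pv_takeWhile_len (a : Int) : ∀ (ds : List Int) (c : Nat), c ≤ ds.length →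
    (∀ (k : Nat) (h : k < ds.length), k < c → ds[k] ≤ a) →
    (∀ (k : Nat) (h : k < ds.length), c ≤ k → ¬ ds[k] ≤ a) →
    (ds.takeWhile (fun d => decide (d ≤ a))).length = c := by
  intro ds
  induction ds with
  | nil =>
    intro c hc _ _
    have : c = 0 := by simpa using hc
    subst this; simp
  | cons d ds ih =>
    intro c hc h1 h2
    cases c with
    | zero =>
      have := h2 0 (by simp) (by omega)
      simp only [List.getElem_cons_zero] at this
      rw [List.takeWhile_cons_of_neg (by simpa using this)]
      simp
    | succ c =>
      have hd : d ≤ a := by simpa using h1 0 (by simp) (by omega)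
      rw [List.takeWhile_cons_of_pos (by simpa using hd)]
      simp only [List.length_cons]
      rw [ih c (by simpa using hc)
        (fun k hk hkc => by simpa using h1 (k + 1) (by simpa using hk) (by omega))
        (fun k hk hkc => by simpa using h2 (k + 1) (by simpa using hk) (by omega))]

lemma pvCountLe_spec (ds : List Int) (a : Int) (hs : ds.Pairwise (· ≤ ·)) :
    pvCountLe ds a 0 ds.length = (ds.takeWhile (fun d => decide (d ≤ a))).length := by
  have hmono : ∀ (p q : Nat) (hpq : p ≤ q) (hq : q < ds.length), ds[p]'(by omega) ≤ ds[q] := by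
    intro p q hpq hq
    rcases Nat.lt_or_ge p q with h | h
    · exact (List.pairwise_iff_getElem.mp hs) p q (by omega) hq h
    · have : p = q := by omega
      subst this; rfl
  have key : ∀ (f lo hi : Nat), hi - lo ≤ f → lo ≤ hi → hi ≤ ds.length →
      (∀ (k : Nat) (h : k < ds.length), k < lo → ds[k] ≤ a) →
      (∀ (k : Nat) (h : k < ds.length), hi ≤ k → ¬ ds[k] ≤ a) →
      pvCountLe ds a lo hi = (ds.takeWhile (fun d => decide (d ≤ a))).length := by
    intro f
    induction f with
    | zero =>
      intro lo hi hf hlh hhi h1 h2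
      have : lo = hi := by omega
      subst this
      rw [pvCountLe, if_neg (by omega)]
      exact (pv_takeWhile_len a ds lo (by omega) h1 (fun k h hk => h2 k h hk)).symm
    | succ f ihf =>
      intro lo hi hf hlh hhi h1 h2
      by_cases hlt : lo < hi
      · have hmid : (lo + hi) / 2 < ds.length := by omega
        have hget : ds.getD ((lo + hi) / 2) 0 = ds[(lo + hi) / 2] :=
          List.getD_eq_getElem _ _ hmid
        rw [pvCountLe, if_pos hlt]
        simp only [hget]
        by_cases hle : ds[(lo + hi) / 2] ≤ a
        · rw [if_pos hle]
          refine ihf _ _ (by omega) (by omega) hhi ?_ h2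
          intro k hk hkm
          exact le_trans (hmono k ((lo + hi) / 2) (by omega) hmid) hle
        · rw [if_neg hle]
          refine ihf _ _ (by omega) (by omega) (by omega) h1 ?_
          intro k hk hkm hka
          exact hle (le_trans (hmono ((lo + hi) / 2) k hkm hk) hka)
      · have : lo = hi := by omega
        subst this
        rw [pvCountLe, if_neg (by omega)]
        exact (pv_takeWhile_len a ds lo (by omega) h1 (fun k h hk => h2 k h hk)).symm
  exact key ds.length 0 ds.length (by omega) (by omega) le_rfl
    (fun k h hk => by omega) (fun k h hk => by omega)

lemma pvBest_fold : ∀ (js : List (Int × Int)) (bs : List Int) (cur : Int),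
    (js.foldl (fun (st : List Int × Int) j =>
        (st.1 ++ [max st.2 j.2], max st.2 j.2)) (bs, cur)).1
    = bs ++ (List.range js.length).map
        (fun i => (js.take (i + 1)).foldl (fun m j => max m j.2) cur) := by
  intro js
  induction js with
  | nil => intro bs cur; simp
  | cons j rest ih =>
    intro bs cur
    rw [List.foldl_cons, ih]
    simp only [List.length_cons, List.range_succ_eq_map, List.map_cons, List.map_map,
      Function.comp_def, List.take_succ_cons, List.foldl_cons]
    simp [List.append_assoc]

lemma pvBest_getD (jobs : List (Int × Int)) (c : Nat) (hc : c ≤ jobs.length) :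
    ((jobs.foldl (fun (st : List Int × Int) j =>
        (st.1 ++ [max st.2 j.2], max st.2 j.2)) ([(0 : Int)], (0 : Int))).1).getD c 0
    = ((jobs.take c).foldl (fun m j => max m j.2) 0) := by
  rw [pvBest_fold]
  cases c with
  | zero => simp
  | succ i =>
    rw [List.singleton_append, List.getD_cons_succ]
    rw [List.getD_eq_getElem _ _ (by simpa using (by omega : i < jobs.length))]
    simp

lemma pvB_value (jobs : List (Int × Int)) (a : Int)
    (hmono : jobs.Pairwise (fun j k => j.1 ≤ k.1)) :
    ((jobs.foldl (fun (st : List Int × Int) j =>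
        (st.1 ++ [max st.2 j.2], max st.2 j.2)) ([(0 : Int)], (0 : Int))).1).getD
      (pvCountLe (jobs.map Prod.fst) a 0 (jobs.map Prod.fst).length) 0
    = pvF jobs a := by
  have hds : (jobs.map Prod.fst).Pairwise (· ≤ ·) := List.pairwise_map.mpr hmono
  rw [pvCountLe_spec _ a hds]
  have hmapTW : (jobs.map Prod.fst).takeWhile (fun d => decide (d ≤ a))
      = (jobs.takeWhile (fun j => decide (j.1 ≤ a))).map Prod.fst := by
    rw [List.takeWhile_map]; rfl
  rw [hmapTW, List.length_map]
  set c := (jobs.takeWhile (fun j => decide (j.1 ≤ a))).length with hcdef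
  have htw := List.takeWhile_prefix (l := jobs) (p := fun j => decide (j.1 ≤ a))
  have hc : c ≤ jobs.length := List.IsPrefix.length_le htw
  rw [pvBest_getD jobs c hc, pvF, hcdef, ← List.prefix_iff_eq_take.mp htw]

lemma pvB_fold (g : Int → Int) :
    ∀ (w : List Int) (tot : Int), w.foldl (fun t a => t + g a) tot = tot + (w.map g).sum := by
  intro w
  induction w with
  | nil => simp
  | cons x xs ih => intro tot; simp [List.foldl_cons, ih]; ring

-- ===== VERDICT (by name: the statement is the Claim_ definition above) =====
theorem maxProfitAssignment_spec : Claim_equal_maxProfitAssignment := by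
  intro difficulty profit worker _
  unfold Spec_maxProfitAssignment maxProfitAssignment maxProfitAssignment_alt
  simp only []
  have hwp : (PySem.List.sorted worker (fun x => x)).Pairwise (· ≤ ·) :=
    PySem.List.sorted_pairwise worker (fun x => x)
  have hmono := fst_mono_sorted2 (List.zip difficulty profit)
  have hA := pvA_fold (PySem.List.sorted2 (List.zip difficulty profit) Prod.fst Prod.snd)
    (PySem.List.sorted worker (fun x => x)) 0 0 (by omega) hwp (by simp)
  simp only [List.take_zero, List.foldl_nil] at hA
  rw [hA, pvB_fold]
  simp only [zero_add]
  congr 1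
  apply List.map_congr_left
  intro a _
  exact (pvB_value _ a hmono).symm
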